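-- pv_equiv track=rewrite | github.com/emjot13/Algorithms-Data-Structures | algorithms_data_structures_python/HeapSort.py | heapify_recursive
-- ===== SOURCE A (Python) =====
-- def heapify_recursive(tab, heapSize, i):
--     left_child = 2 * i + 1
--     right_child = 2 * i + 2
--     if left_child < heapSize and tab[left_child] < tab[i]:
--         largest = left_child
--     else:
--         largest = i
--     if right_child < heapSize and tab[right_child] < tab[largest]:
--         largest = right_child
--     if largest != i:
--         tab[i], tab[largest] = tab[largest], tab[i]
--         heapify_recursive(tab, heapSize, largest)
--     return tab
-- ===== SOURCE B (Python) =====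
-- def heapify_recursive(tab, heapSize, i):
--     # Iterative hole-based sift-down: save tab[i], shift smaller children up
--     # with single writes, drop the saved value at the final hole.
--     child = 2 * i + 1
--     if child >= heapSize:
--         return tab
--     v = tab[i]
--     while child < heapSize:
--         if child + 1 < heapSize and tab[child + 1] < tab[child]:
--             child += 1
--         if tab[child] >= v:
--             break
--         tab[i] = tab[child]
--         i = child
--         child = 2 * i + 1
--     tab[i] = v
--     return tab
-- ===== Notes on version B (the rewrite author's own statement) =====
-- stated objective: alternative
-- what changed: Replaces the recursive swap-based sift-down (two writes per level, one recursive call per swap) by an iterative hole-based sift-down that saves tab[i] once, picks the smaller child per level, shifts it up with a single write, and drops the saved value at the final hole.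
-- outside the precondition, e.g. on heapify_recursive([1, 2], 1, -1): A returns [2, 1], B returns [2, 1]; on heapify_recursive([1, 2, 3], 5, 0): A returns [1, 2, 3], B returns [1, 2, 3]
import Mathlib
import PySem

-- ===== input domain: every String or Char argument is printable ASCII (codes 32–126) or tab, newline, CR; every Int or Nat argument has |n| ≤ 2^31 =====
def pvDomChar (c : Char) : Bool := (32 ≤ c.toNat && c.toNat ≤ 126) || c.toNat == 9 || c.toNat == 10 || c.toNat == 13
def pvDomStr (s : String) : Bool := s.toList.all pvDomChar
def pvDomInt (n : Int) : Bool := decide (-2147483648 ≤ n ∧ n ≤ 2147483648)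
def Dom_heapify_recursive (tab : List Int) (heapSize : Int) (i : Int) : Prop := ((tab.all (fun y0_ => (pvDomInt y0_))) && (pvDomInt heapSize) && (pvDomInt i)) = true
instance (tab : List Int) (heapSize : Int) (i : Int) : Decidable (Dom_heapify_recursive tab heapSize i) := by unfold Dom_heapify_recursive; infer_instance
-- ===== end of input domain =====

-- B replaces A's recursive swap-based sift-down by an iterative hole-based sift-down
-- (save tab[i], shift smaller children up with single writes, drop the value at the final
-- hole); same return value on Pre_. Both Pythons mutate tab in place identically (the
-- returned list IS the mutated argument); the theorems are about the returned value.


-- ===== PORT A =====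
-- A, with a fuel argument to make the recursion structural; the entry point passes
-- tab.length + heapSize.toNat + 2, which is never exhausted under Pre_ (the proof of the
-- claim never reaches fuel 0 there).  A `none` from pyGet? is Python's IndexError: the
-- port stops and returns the list (those inputs are outside Pre_).
def heapifyAFuel : Nat → List Int → Int → Int → List Int
  | 0, tab, _, _ => tab
  | f+1, tab, heapSize, i =>
    let left := 2*i + 1
    let right := 2*i + 2
    -- if left_child < heapSize and tab[left_child] < tab[i]: largest = left_child else: largest = i
    let s1 : Option Int :=
      if left < heapSize then
        match PySem.List.pyGet? tab left, PySem.List.pyGet? tab i with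
        | some a, some b => some (if a < b then left else i)
        | _, _ => none
      else some i
    match s1 with
    | none => tab
    | some l1 =>
      -- if right_child < heapSize and tab[right_child] < tab[largest]: largest = right_child
      let s2 : Option Int :=
        if right < heapSize then
          match PySem.List.pyGet? tab right, PySem.List.pyGet? tab l1 with
          | some a, some b => some (if a < b then right else l1)
          | _, _ => none
        else some l1
      match s2 with
      | none => tab
      | some largest =>
        if largest ≠ i then
          -- tab[i], tab[largest] = tab[largest], tab[i]; recurse on largest
          match PySem.List.pyGet? tab largest, PySem.List.pyGet? tab i with
          | some x, some y =>
            heapifyAFuel f (PySem.List.pySetD (PySem.List.pySetD tab i x) largest y) heapSize largest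
          | _, _ => tab
        else tab

def heapify_recursive (tab : List Int) (heapSize : Int) (i : Int) : List Int :=
  heapifyAFuel (tab.length + heapSize.toNat + 2) tab heapSize i

-- ===== PORT B =====
-- the while loop of Source B; state = (tab, i = current hole, child); v is the saved value.
-- Fueled like A's port; the entry fuel is never exhausted under Pre_.
def siftLoop : Nat → Int → Int → List Int → Int → Int → List Int
  | 0, _, _, tab, _, _ => tab
  | f+1, heapSize, v, tab, i, child =>
    if child < heapSize then
      -- if child + 1 < heapSize and tab[child + 1] < tab[child]: child += 1
      let c? : Option Int :=
        if child + 1 < heapSize then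
          match PySem.List.pyGet? tab (child + 1), PySem.List.pyGet? tab child with
          | some a, some b => some (if a < b then child + 1 else child)
          | _, _ => none
        else some child
      match c? with
      | none => tab
      | some c =>
        match PySem.List.pyGet? tab c with
        | none => tab
        | some cv =>
          if cv ≥ v then PySem.List.pySetD tab i v        -- break; tab[i] = v
          else siftLoop f heapSize v (PySem.List.pySetD tab i cv) c (2*c + 1)
    else PySem.List.pySetD tab i v                         -- loop exit; tab[i] = v

def heapify_recursive_alt (tab : List Int) (heapSize : Int) (i : Int) : List Int :=
  let child := 2*i + 1
  if child ≥ heapSize then tab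
  else
    match PySem.List.pyGet? tab i with
    | none => tab                                          -- IndexError, outside Pre_
    | some v => siftLoop (tab.length + heapSize.toNat + 2) heapSize v tab i child

-- ===== PRECONDITION & SPEC =====
-- Pre_ excludes negative i — there A's value rests on Python's accidental negative-index
-- wraparound — and heapSize > len(tab) when a child index lies below heapSize, where the
-- child accesses tab[2*i+1] / tab[2*i+2] can raise IndexError.
def Pre_heapify_recursive (tab : List Int) (heapSize : Int) (i : Int) : Prop :=
  0 ≤ i ∧ (heapSize ≤ (tab.length : Int) ∨ heapSize ≤ 2*i + 1)
instance (tab : List Int) (heapSize : Int) (i : Int) : Decidable (Pre_heapify_recursive tab heapSize i) := by unfold Pre_heapify_recursive; infer_instance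

def pvWitness_heapify_recursive : List Int × Int × Int := ([3, 1, 2], 3, 0)

def Spec_heapify_recursive (tab : List Int) (heapSize : Int) (i : Int) (out : List Int) : Prop := out = heapify_recursive_alt tab heapSize i
instance (tab : List Int) (heapSize : Int) (i : Int) (out : List Int) : Decidable (Spec_heapify_recursive tab heapSize i out) := by unfold Spec_heapify_recursive; infer_instance

-- ===== CLAIM (what is proved, stated in full; the proofs are below) =====
def Claim_equal_heapify_recursive : Prop := ∀ (tab : List Int) (heapSize : Int) (i : Int), Dom_heapify_recursive tab heapSize i → Pre_heapify_recursive tab heapSize i → Spec_heapify_recursive tab heapSize i (heapify_recursive tab heapSize i)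

-- ===== LEMMAS AND PROOFS =====

-- A with no left child in range does nothing.
theorem heapifyAFuel_of_no_child (f : Nat) (tab : List Int) (heapSize i : Int)
    (h : ¬ 2*i + 1 < heapSize) : heapifyAFuel (f+1) tab heapSize i = tab := by
  simp only [heapifyAFuel]
  have h2 : ¬ 2*i + 2 < heapSize := by omega
  simp [h, h2]


-- pyGet? / pySetD interaction at nonnegative indices (specific combinations of the
-- PySem primitives with Mathlib's List.set lemmas, used throughout the invariant proof).
theorem pyGet?_pySetD_self (tab : List Int) (i v : Int) (hi : 0 ≤ i) (hlen : i < (tab.length : Int)) :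
    PySem.List.pyGet? (PySem.List.pySetD tab i v) i = some v := by
  rw [PySem.List.pySetD_of_nonneg _ _ hi, PySem.List.pyGet?_of_nonneg _ hi]
  exact List.getElem?_set_self (by omega)

theorem pyGet?_pySetD_ne (tab : List Int) (i v j : Int) (hi : 0 ≤ i) (hj : 0 ≤ j) (hne : j ≠ i) :
    PySem.List.pyGet? (PySem.List.pySetD tab i v) j = PySem.List.pyGet? tab j := by
  rw [PySem.List.pySetD_of_nonneg _ _ hi, PySem.List.pyGet?_of_nonneg _ hj,
      PySem.List.pyGet?_of_nonneg _ hj]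
  exact List.getElem?_set_ne (by omega)

theorem pySetD_pySetD_self (tab : List Int) (i x y : Int) (hi : 0 ≤ i) :
    PySem.List.pySetD (PySem.List.pySetD tab i x) i y = PySem.List.pySetD tab i y := by
  rw [PySem.List.pySetD_of_nonneg _ _ hi, PySem.List.pySetD_of_nonneg _ _ hi,
      PySem.List.pySetD_of_nonneg _ _ hi]
  exact List.set_set x

-- Invariant lemma: A run from the swapped-in state `pySetD tab i v` equals B's loop run
-- from hole state (tab, i, child = 2*i+1) carrying v, in fuel lockstep.

theorem main_invariant (heapSize : Int) : ∀ (f : Nat) (tab : List Int) (i v : Int),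
    0 ≤ i → heapSize ≤ (tab.length : Int) → i < (tab.length : Int) →
    (heapSize - i).toNat ≤ f →
    heapifyAFuel (f+1) (PySem.List.pySetD tab i v) heapSize i
      = siftLoop (f+1) heapSize v tab i (2*i + 1) := by
  intro f
  induction f with
  | zero =>
    intro tab i v hi hhs hilen hfuel
    rw [heapifyAFuel_of_no_child 0 _ _ _ (by omega)]
    simp only [siftLoop]
    rw [if_neg (by omega)]
  | succ f ih =>
    intro tab i v hi hhs hilen hfuel
    by_cases hL : 2*i + 1 < heapSize
    · have hlL : 2*i + 1 < (tab.length : Int) := by omega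
      have hiv : PySem.List.pyGet? (PySem.List.pySetD tab i v) i = some v :=
        pyGet?_pySetD_self tab i v hi hilen
      obtain ⟨a, ha⟩ : ∃ a, PySem.List.pyGet? tab (2*i + 1) = some a :=
        ⟨_, PySem.List.pyGet?_eq_some_getElem tab (by omega) hlL⟩
      have haA : PySem.List.pyGet? (PySem.List.pySetD tab i v) (2*i + 1) = some a := by
        rw [pyGet?_pySetD_ne tab i v _ hi (by omega) (by omega)]; exact ha
      have hdd : ∀ x y : Int,
          PySem.List.pySetD (PySem.List.pySetD tab i x) i y = PySem.List.pySetD tab i y :=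
        fun x y => pySetD_pySetD_self tab i x y hi
      have hlen' : ∀ x : Int, ((PySem.List.pySetD tab i x).length : Int) = (tab.length : Int) := by
        intro x; rw [PySem.List.length_pySetD]
      have hneL : (2*i + 1 : Int) ≠ i := by omega
      have h21 : (2*i + 1 + 1 : Int) = 2*i + 2 := by ring
      by_cases hR : 2*i + 2 < heapSize
      · have hrlen : 2*i + 2 < (tab.length : Int) := by omega
        obtain ⟨r, hrg⟩ : ∃ r, PySem.List.pyGet? tab (2*i + 2) = some r :=
          ⟨_, PySem.List.pyGet?_eq_some_getElem tab (by omega) hrlen⟩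
        have hrA : PySem.List.pyGet? (PySem.List.pySetD tab i v) (2*i + 2) = some r := by
          rw [pyGet?_pySetD_ne tab i v _ hi (by omega) (by omega)]; exact hrg
        have hneR : (2*i + 2 : Int) ≠ i := by omega
        by_cases hav : a < v
        · by_cases hra : r < a
          · -- smaller child is the right one; both sides move to 2*i+2 carrying r
            have hnrv : ¬ r ≥ v := by omega
            conv_lhs => rw [heapifyAFuel]
            conv_rhs => rw [siftLoop]
            simp only [h21, hL, hR, hav, hra, hnrv, hiv, haA, hrA, hrg, ha,
              if_true, if_false, ne_eq, hneR, not_false_iff, hdd]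
            exact ih (PySem.List.pySetD tab i r) (2*i + 2) v (by omega)
              (by rw [hlen']; exact hhs) (by rw [hlen']; omega) (by omega)
          · -- smaller child is the left one; both sides move to 2*i+1 carrying a
            have hnav : ¬ a ≥ v := by omega
            conv_lhs => rw [heapifyAFuel]
            conv_rhs => rw [siftLoop]
            simp only [h21, hL, hR, hav, hra, hnav, hiv, haA, hrA, hrg, ha,
              if_true, if_false, ne_eq, hneL, not_false_iff, hdd]
            exact ih (PySem.List.pySetD tab i a) (2*i + 1) v (by omega)
              (by rw [hlen']; exact hhs) (by rw [hlen']; omega) (by omega)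
        · by_cases hrv : r < v
          · have hra : r < a := by omega
            have hnrv : ¬ r ≥ v := by omega
            conv_lhs => rw [heapifyAFuel]
            conv_rhs => rw [siftLoop]
            simp only [h21, hL, hR, hav, hra, hrv, hnrv, hiv, haA, hrA, hrg, ha,
              if_true, if_false, ne_eq, hneR, not_false_iff, hdd]
            exact ih (PySem.List.pySetD tab i r) (2*i + 2) v (by omega)
              (by rw [hlen']; exact hhs) (by rw [hlen']; omega) (by omega)
          · conv_lhs => rw [heapifyAFuel]
            conv_rhs => rw [siftLoop]
            by_cases hra : r < a
            · have hge : r ≥ v := by omega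
              simp only [h21, hL, hR, hav, hra, hrv, hge, hiv, haA, hrA, hrg, ha,
                if_true, if_false, hdd]
              rw [if_neg (by simp)]
            · have hge : a ≥ v := by omega
              simp only [h21, hL, hR, hav, hra, hrv, hge, hiv, haA, hrA, hrg, ha,
                if_true, if_false, hdd]
              rw [if_neg (by simp)]
      · by_cases hav : a < v
        · have hnav : ¬ a ≥ v := by omega
          conv_lhs => rw [heapifyAFuel]
          conv_rhs => rw [siftLoop]
          simp only [h21, hL, hR, hav, hnav, hiv, haA, ha,
            if_true, if_false, ne_eq, hneL, not_false_iff, hdd]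
          exact ih (PySem.List.pySetD tab i a) (2*i + 1) v (by omega)
            (by rw [hlen']; exact hhs) (by rw [hlen']; omega) (by omega)
        · have hge : a ≥ v := by omega
          conv_lhs => rw [heapifyAFuel]
          conv_rhs => rw [siftLoop]
          simp only [h21, hL, hR, hav, hge, hiv, haA, ha,
            if_true, if_false, hdd]
          rw [if_neg (by simp)]
    · rw [heapifyAFuel_of_no_child _ _ _ _ hL]
      simp only [siftLoop]
      rw [if_neg (by omega)]

-- ===== VERDICT (by name: the statement is the Claim_ definition above) =====
theorem heapify_recursive_spec : Claim_equal_heapify_recursive := by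
  intro tab heapSize i _ hpre
  obtain ⟨hi, hd⟩ := hpre
  unfold Spec_heapify_recursive
  simp only [heapify_recursive, heapify_recursive_alt]
  by_cases h : 2*i + 1 ≥ heapSize
  · rw [if_pos h]
    exact heapifyAFuel_of_no_child (tab.length + heapSize.toNat + 1) tab heapSize i (by omega)
  · have hhs : heapSize ≤ (tab.length : Int) := by
      rcases hd with hhs | hbad
      · exact hhs
      · omega
    have hil : i < (tab.length : Int) := by omega
    have hil' : i.toNat < tab.length := by omega
    have hv : PySem.List.pyGet? tab i = some (tab[i.toNat]'hil') :=
      PySem.List.pyGet?_eq_some_getElem tab hi hil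
    have hset : PySem.List.pySetD tab i (tab[i.toNat]'hil') = tab := by
      rw [PySem.List.pySetD_of_nonneg _ _ hi]
      exact List.set_getElem_self hil'
    rw [if_neg h, hv]
    have hmain := main_invariant heapSize (tab.length + heapSize.toNat + 1) tab i
      (tab[i.toNat]'hil') hi hhs hil (by omega)
    rw [hset] at hmain
    exact hmain
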